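-- pv_equiv track=rewrite | github.com/SuntsAnnet/Sintez_sist | Hit Count.py | counter_effect
-- ===== SOURCE A (Python) =====
-- def counter_effect(hit_count):
--     t = []
--     for i in list(map(int, hit_count)):
--         s = []
--         for k in range(0,i+1):
--             s.append(k)
--         t.append(s)
--
--     return t
-- ===== SOURCE B (Python) =====
-- def counter_effect(hit_count):
--     vals = [int(x) for x in hit_count]
--     if not vals:
--         return []
--     m = max(vals)
--     base = list(range(m + 1))
--     return [base[:i + 1] if i >= 0 else [] for i in vals]
-- ===== Notes on version B (the rewrite author's own statement) =====
-- stated objective: alternative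
-- what changed: B builds one master list range(max+1) once and produces each output row by slicing it, instead of regenerating each range element-by-element with an inner append loop.
import Mathlib
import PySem

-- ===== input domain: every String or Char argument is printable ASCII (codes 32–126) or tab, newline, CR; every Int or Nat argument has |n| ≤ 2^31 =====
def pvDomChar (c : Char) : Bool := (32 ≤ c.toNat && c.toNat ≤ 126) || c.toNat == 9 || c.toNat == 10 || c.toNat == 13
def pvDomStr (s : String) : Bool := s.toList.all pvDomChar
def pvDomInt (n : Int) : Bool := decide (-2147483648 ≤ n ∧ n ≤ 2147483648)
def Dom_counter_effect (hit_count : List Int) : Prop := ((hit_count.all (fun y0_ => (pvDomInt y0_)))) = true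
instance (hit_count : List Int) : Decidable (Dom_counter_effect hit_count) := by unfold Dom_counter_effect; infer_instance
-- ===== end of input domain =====

-- B builds one master list range(max+1) once and slices it per input; A regenerates each range with an inner append loop. Objective: alternative.

-- ===== PORT A =====
def counter_effect (hit_count : List Int) : List (List Int) :=
  hit_count.foldl (fun t i =>
    t ++ [(PySem.List.pyRange 0 (i + 1) 1).foldl (fun s k => s ++ [k]) []]) []

-- ===== PORT B =====
def counter_effect_alt (hit_count : List Int) : List (List Int) :=
  if hit_count = [] then []
  else
    let m := (PySem.List.max? hit_count (fun y => y)).getD 0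
    let base := PySem.List.pyRange 0 (m + 1) 1
    hit_count.map (fun i => if 0 ≤ i then PySem.List.slice base none (some (i + 1)) else [])

-- ===== PRECONDITION & SPEC =====
def Spec_counter_effect (hit_count : List Int) (out : List (List Int)) : Prop := out = counter_effect_alt hit_count
instance (hit_count : List Int) (out : List (List Int)) : Decidable (Spec_counter_effect hit_count out) := by unfold Spec_counter_effect; infer_instance

-- ===== CLAIM (what is proved, stated in full; the proofs are below) =====
def Claim_equal_counter_effect : Prop := ∀ (hit_count : List Int), Dom_counter_effect hit_count → Spec_counter_effect hit_count (counter_effect hit_count)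

-- ===== LEMMAS AND PROOFS =====

theorem foldl_snoc_id (l init : List Int) : l.foldl (fun s k => s ++ [k]) init = init ++ l := by
  induction l generalizing init with
  | nil => simp
  | cons x t ih => simp [List.foldl, ih]

theorem counter_effect_eq_map (hit_count : List Int) :
    counter_effect hit_count = hit_count.map (fun i => PySem.List.pyRange 0 (i + 1) 1) := by
  unfold counter_effect
  have h : ∀ (l : List Int) (acc : List (List Int)),
      l.foldl (fun t i => t ++ [(PySem.List.pyRange 0 (i + 1) 1).foldl (fun s k => s ++ [k]) []]) acc
        = acc ++ l.map (fun i => PySem.List.pyRange 0 (i + 1) 1) := by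
    intro l
    induction l with
    | nil => simp
    | cons x t ih =>
      intro acc
      rw [List.foldl_cons, ih]
      simp only [foldl_snoc_id, List.nil_append, List.append_assoc, List.map_cons,
        List.singleton_append]
  simpa using h hit_count []

theorem take_pyRange_zero (i m : Int) (h0 : 0 ≤ i) (hm : i ≤ m) :
    (PySem.List.pyRange 0 (m + 1) 1).take (i + 1).toNat = PySem.List.pyRange 0 (i + 1) 1 := by
  rw [PySem.List.pyRange_one_append 0 (i + 1) (m + 1) (by omega) (by omega)]
  have hlen : (PySem.List.pyRange 0 (i + 1) 1).length = (i + 1).toNat := by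
    simpa using PySem.List.length_pyRange_one 0 (i + 1)
  rw [← hlen, List.take_left]

theorem counter_effect_spec' (hit_count : List Int) :
    counter_effect hit_count = counter_effect_alt hit_count := by
  rw [counter_effect_eq_map]
  unfold counter_effect_alt
  rcases h : hit_count with _ | ⟨x, t⟩
  · simp
  · simp only [if_neg (List.cons_ne_nil x t)]
    apply List.map_congr_left
    intro i hi
    by_cases hneg : 0 ≤ i
    · rw [if_pos hneg]
      have hmax : (PySem.List.max? (x :: t) (fun y => y)).getD 0 = t.foldl max x := by
        rw [PySem.List.max?_id_cons]; rfl
      have hle : i ≤ t.foldl max x := by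
        rcases List.mem_cons.mp hi with hi | hi
        · subst hi; exact (PySem.List.le_foldl_max t i).1
        · exact (PySem.List.le_foldl_max t x).2 i hi
      rw [hmax, PySem.List.slice_to _ (by omega)]
      exact (take_pyRange_zero i (t.foldl max x) hneg hle).symm
    · rw [if_neg hneg]
      exact PySem.List.pyRange_one_eq_nil (by omega)

-- ===== VERDICT (by name: the statement is the Claim_ definition above) =====
theorem counter_effect_spec : Claim_equal_counter_effect := by
  intro hit_count _
  unfold Spec_counter_effect
  exact counter_effect_spec' hit_count
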